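-- pv_equiv track=rewrite | github.com/astrosaeed/gnn | src/reasoning/sql_to_asp.py | refineasp
-- ===== SOURCE A (Python) =====
-- def refineasp(givenlist):
-- 	same=[]
--
-- 	for i in range(len(givenlist)):
-- 		for j in range(i,len(givenlist)):
-- 			if givenlist[i][0] == givenlist[j][2] and givenlist[i][2] == givenlist[j][0] and givenlist[i][1] == givenlist[j][1] and givenlist[i][3:-1] == givenlist[j][3:-1]:
-- 				print ('hi')
-- 				same.append(givenlist[j])
--
-- 	return  list(set(givenlist) -set(same))
-- ===== SOURCE B (Python) =====
-- def refineasp(givenlist):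
--     # One forward pass: an element is dropped when the reversed-endpoints key
--     # (e[2], e[1], e[0], e[3:-1]) already occurred (as a forward key) at or
--     # before it; then one dedup pass emitting the surviving distinct elements.
--     # (Return value only: A returns list(set(...) - set(...)), whose order is
--     # hash order; outputs are compared as sets.)
--     seen_keys = set()
--     removed = set()
--     for e in givenlist:
--         seen_keys.add((e[0], e[1], e[2], tuple(e[3:-1])))
--         if (e[2], e[1], e[0], tuple(e[3:-1])) in seen_keys:
--             removed.add(e)
--     result = []
--     emitted = set()
--     for e in givenlist:
--         if e not in emitted:
--             emitted.add(e)
--             if e not in removed: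
--                 result.append(e)
--     return result
-- ===== Notes on version B (the rewrite author's own statement) =====
-- stated objective: alternative
-- what changed: Replaced the nested index loops and the final set subtraction with a single forward pass over a growing hash set of forward keys (e[0],e[1],e[2],e[3:-1]) that marks an element removed when its reversed-endpoints key was already seen, plus one dedup pass emitting the survivors; Pre_ excludes only inputs where some element has fewer than 3 items, on which A raises IndexError.
import Mathlib
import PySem

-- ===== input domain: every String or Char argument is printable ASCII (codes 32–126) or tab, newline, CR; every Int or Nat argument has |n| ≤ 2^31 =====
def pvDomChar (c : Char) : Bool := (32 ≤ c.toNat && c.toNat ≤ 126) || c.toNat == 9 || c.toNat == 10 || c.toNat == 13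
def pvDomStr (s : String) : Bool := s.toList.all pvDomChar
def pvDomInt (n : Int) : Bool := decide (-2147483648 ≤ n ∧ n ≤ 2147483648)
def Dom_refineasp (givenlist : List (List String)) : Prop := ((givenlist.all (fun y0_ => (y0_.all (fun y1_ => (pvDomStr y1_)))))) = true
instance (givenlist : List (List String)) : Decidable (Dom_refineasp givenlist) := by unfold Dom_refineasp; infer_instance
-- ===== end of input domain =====

-- B replaces A's nested index loops with one forward pass over a growing set of
-- forward keys (an element is dropped when its reversed-endpoints key already occurred
-- at or before it) followed by one dedup pass; A's Python returns list(set - set),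
-- whose order is hash order, and both ports emit the surviving distinct elements in
-- first-occurrence order (outputs are compared as sets).

-- ===== PORT A =====
def refineasp (givenlist : List (List String)) : List (List String) :=
  let same : List (List String) :=
    (PySem.List.pyRange 0 (PySem.List.len givenlist) 1).foldl (fun same i =>
      (PySem.List.pyRange i (PySem.List.len givenlist) 1).foldl (fun same j =>
        if (PySem.List.pyGetD (PySem.List.pyGetD givenlist i []) 0 ""
              == PySem.List.pyGetD (PySem.List.pyGetD givenlist j []) 2 "") &&
           (PySem.List.pyGetD (PySem.List.pyGetD givenlist i []) 2 ""
              == PySem.List.pyGetD (PySem.List.pyGetD givenlist j []) 0 "") &&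
           (PySem.List.pyGetD (PySem.List.pyGetD givenlist i []) 1 ""
              == PySem.List.pyGetD (PySem.List.pyGetD givenlist j []) 1 "") &&
           (PySem.List.slice (PySem.List.pyGetD givenlist i []) (some 3) (some (-1))
              == PySem.List.slice (PySem.List.pyGetD givenlist j []) (some 3) (some (-1)))
        then same ++ [PySem.List.pyGetD givenlist j []] else same) same) []
  PySem.Set.diff (PySem.Set.ofList givenlist) (PySem.Set.ofList same)

-- ===== PORT B =====
def refineasp_alt (givenlist : List (List String)) : List (List String) :=
  let scan := givenlist.foldl
    (fun (st : PySem.Set (String × String × String × List String) × PySem.Set (List String)) e =>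
      let seenKeys := PySem.Set.add st.1
        (PySem.List.pyGetD e 0 "", PySem.List.pyGetD e 1 "", PySem.List.pyGetD e 2 "",
         PySem.List.slice e (some 3) (some (-1)))
      if seenKeys.contains
           (PySem.List.pyGetD e 2 "", PySem.List.pyGetD e 1 "", PySem.List.pyGetD e 0 "",
            PySem.List.slice e (some 3) (some (-1)))
      then (seenKeys, PySem.Set.add st.2 e)
      else (seenKeys, st.2))
    ([], [])
  (givenlist.foldl
    (fun (st : List (List String) × PySem.Set (List String)) e =>
      if !(st.2.contains e) then
        ((if !(scan.2.contains e) then st.1 ++ [e] else st.1), PySem.Set.add st.2 e)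
      else st)
    ([], [])).1

-- ===== PRECONDITION & SPEC =====
-- Python A raises IndexError exactly when some element has fewer than 3 items (the
-- comparison indexes e[0], e[1] and e[2] of every element); Pre_ excludes only those
-- inputs and admits every input on which A returns.
def Pre_refineasp (givenlist : List (List String)) : Prop :=
  givenlist.all (fun e => 3 ≤ e.length) = true
instance (givenlist : List (List String)) : Decidable (Pre_refineasp givenlist) := by
  unfold Pre_refineasp; infer_instance
def pvWitness_refineasp : List (List String) := [["a", "r", "b"], ["b", "r", "a"]]

def Spec_refineasp (givenlist : List (List String)) (out : List (List String)) : Prop :=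
  out = refineasp_alt givenlist
instance (givenlist : List (List String)) (out : List (List String)) :
    Decidable (Spec_refineasp givenlist out) := by unfold Spec_refineasp; infer_instance

-- ===== CLAIM (what is proved, stated in full; the proofs are below) =====
def Claim_equal_refineasp : Prop := ∀ (givenlist : List (List String)),
  Dom_refineasp givenlist → Pre_refineasp givenlist →
  Spec_refineasp givenlist (refineasp givenlist)

-- ===== LEMMAS AND PROOFS =====

-- the forward key (e[0], e[1], e[2], e[3:-1]) and the reversed-endpoints key
def pvKey (e : List String) : String × String × String × List String :=
  (PySem.List.pyGetD e 0 "", PySem.List.pyGetD e 1 "", PySem.List.pyGetD e 2 "",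
   PySem.List.slice e (some 3) (some (-1)))
def pvRKey (e : List String) : String × String × String × List String :=
  (PySem.List.pyGetD e 2 "", PySem.List.pyGetD e 1 "", PySem.List.pyGetD e 0 "",
   PySem.List.slice e (some 3) (some (-1)))

-- A's comparison between elements gi (row) and x (column)
def pvCond (gi x : List String) : Bool :=
  (PySem.List.pyGetD gi 0 "" == PySem.List.pyGetD x 2 "") &&
  (PySem.List.pyGetD gi 2 "" == PySem.List.pyGetD x 0 "") &&
  (PySem.List.pyGetD gi 1 "" == PySem.List.pyGetD x 1 "") &&
  (PySem.List.slice gi (some 3) (some (-1)) == PySem.List.slice x (some 3) (some (-1)))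

-- A's `same` list, restated as a structural recursion over suffixes
def pvGoA : List (List String) → List (List String)
  | [] => []
  | e :: t => (e :: t).filter (fun x => pvCond e x) ++ pvGoA t

-- removal spec: v is removed iff some occurrence of v is preceded (weakly) by an
-- element whose forward key equals v's reversed key
def pvRem : List (List String) → List String → Prop
  | [], _ => False
  | e :: t, v => (pvRKey v = pvKey e ∧ v ∈ e :: t) ∨ pvRem t v

-- B's first pass, with the key set K accumulated so far made explicit
def pvRemK (K : PySem.Set (String × String × String × List String)) :
    List (List String) → List String → Prop
  | [], _ => False
  | e :: t, v =>
      (v = e ∧ pvRKey e ∈ PySem.Set.add K (pvKey e)) ∨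
      pvRemK (PySem.Set.add K (pvKey e)) t v

-- dedup with an explicit "already emitted" accumulator
def pvDW (s : PySem.Set (List String)) : List (List String) → List (List String)
  | [] => []
  | e :: t => if s.contains e then pvDW s t else e :: pvDW (PySem.Set.add s e) t

theorem pv_cond_iff (e x : List String) : pvCond e x = true ↔ pvRKey x = pvKey e := by
  simp only [pvCond, Bool.and_eq_true, beq_iff_eq, pvKey, pvRKey, Prod.mk.injEq]
  constructor
  · rintro ⟨⟨⟨h1, h2⟩, h3⟩, h4⟩
    exact ⟨h1.symm, h3.symm, h2.symm, h4.symm⟩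
  · rintro ⟨h1, h2, h3, h4⟩
    exact ⟨⟨⟨h1.symm, h3.symm⟩, h2.symm⟩, h4.symm⟩

theorem pv_flat (g : List (List String)) :
    (List.range g.length).flatMap
      (fun i => (g.drop i).filter (fun x => pvCond (g.getD i []) x)) = pvGoA g := by
  induction g with
  | nil => simp [pvGoA]
  | cons e t ih =>
    rw [List.length_cons, List.range_succ_eq_map]
    simp only [List.flatMap_cons, List.flatMap_map, List.drop_zero, List.getD_cons_zero,
      Nat.succ_eq_add_one, List.drop_succ_cons, List.getD_cons_succ]
    rw [ih]
    rfl

theorem pv_sameA_eq_goA (g : List (List String)) :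
    ((PySem.List.pyRange 0 (PySem.List.len g) 1).foldl (fun same i =>
      (PySem.List.pyRange i (PySem.List.len g) 1).foldl (fun same j =>
        if (PySem.List.pyGetD (PySem.List.pyGetD g i []) 0 ""
              == PySem.List.pyGetD (PySem.List.pyGetD g j []) 2 "") &&
           (PySem.List.pyGetD (PySem.List.pyGetD g i []) 2 ""
              == PySem.List.pyGetD (PySem.List.pyGetD g j []) 0 "") &&
           (PySem.List.pyGetD (PySem.List.pyGetD g i []) 1 ""
              == PySem.List.pyGetD (PySem.List.pyGetD g j []) 1 "") &&
           (PySem.List.slice (PySem.List.pyGetD g i []) (some 3) (some (-1))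
              == PySem.List.slice (PySem.List.pyGetD g j []) (some 3) (some (-1)))
        then same ++ [PySem.List.pyGetD g j []] else same) same) []) = pvGoA g := by
  have h1 : ((PySem.List.pyRange 0 (PySem.List.len g) 1).foldl (fun same i =>
      (PySem.List.pyRange i (PySem.List.len g) 1).foldl (fun same j =>
        if (PySem.List.pyGetD (PySem.List.pyGetD g i []) 0 ""
              == PySem.List.pyGetD (PySem.List.pyGetD g j []) 2 "") &&
           (PySem.List.pyGetD (PySem.List.pyGetD g i []) 2 ""
              == PySem.List.pyGetD (PySem.List.pyGetD g j []) 0 "") &&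
           (PySem.List.pyGetD (PySem.List.pyGetD g i []) 1 ""
              == PySem.List.pyGetD (PySem.List.pyGetD g j []) 1 "") &&
           (PySem.List.slice (PySem.List.pyGetD g i []) (some 3) (some (-1))
              == PySem.List.slice (PySem.List.pyGetD g j []) (some 3) (some (-1)))
        then same ++ [PySem.List.pyGetD g j []] else same) same) [])
      = (PySem.List.pyRange 0 (PySem.List.len g) 1).foldl (fun same i =>
          same ++ ((g.drop i.toNat).filter (fun x => pvCond (PySem.List.pyGetD g i []) x))) [] := by
    apply List.foldl_ext
    intro s i hi
    have h0 : (0 : Int) ≤ i := (PySem.List.mem_pyRange_one.mp hi).1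
    have hin :
        (PySem.List.pyRange i (PySem.List.len g) 1).foldl (fun same j =>
          if (PySem.List.pyGetD (PySem.List.pyGetD g i []) 0 ""
                == PySem.List.pyGetD (PySem.List.pyGetD g j []) 2 "") &&
             (PySem.List.pyGetD (PySem.List.pyGetD g i []) 2 ""
                == PySem.List.pyGetD (PySem.List.pyGetD g j []) 0 "") &&
             (PySem.List.pyGetD (PySem.List.pyGetD g i []) 1 ""
                == PySem.List.pyGetD (PySem.List.pyGetD g j []) 1 "") &&
             (PySem.List.slice (PySem.List.pyGetD g i []) (some 3) (some (-1))
                == PySem.List.slice (PySem.List.pyGetD g j []) (some 3) (some (-1)))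
          then same ++ [PySem.List.pyGetD g j []] else same) s
        = (g.drop i.toNat).foldl (fun same x =>
            if pvCond (PySem.List.pyGetD g i []) x then same ++ [x] else same) s :=
      PySem.List.foldl_pyRange_pyGetD g []
        (fun same x => if pvCond (PySem.List.pyGetD g i []) x then same ++ [x] else same) s h0
    rw [hin, PySem.List.foldl_append_if (fun x => pvCond (PySem.List.pyGetD g i []) x)
          (fun x => x)]
    simp
  rw [h1]
  have hlen : PySem.List.len g = (g.length : Int) := rfl
  rw [PySem.List.foldl_append_eq_flatMap, hlen, PySem.List.pyRange_zero_natCast,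
    List.flatMap_map]
  simp only [Int.toNat_natCast, PySem.List.pyGetD_natCast, List.nil_append]
  exact pv_flat g

theorem pv_mem_goA (g : List (List String)) (v : List String) :
    v ∈ pvGoA g ↔ pvRem g v := by
  induction g with
  | nil => simp [pvGoA, pvRem]
  | cons e t ih =>
    simp only [pvGoA, List.mem_append, List.mem_filter, pv_cond_iff, pvRem, ih]
    tauto

theorem pv_bridge (l : List (List String))
    (K : PySem.Set (String × String × String × List String)) (v : List String) :
    pvRemK K l v ↔ (pvRem l v ∨ (pvRKey v ∈ K ∧ v ∈ l)) := by
  induction l generalizing K with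
  | nil => simp [pvRemK, pvRem]
  | cons e t ih =>
    simp only [pvRemK, pvRem, ih, PySem.Set.mem_add, List.mem_cons]
    by_cases hv : v = e
    · subst hv; tauto
    · tauto

theorem pv_mem_scan (g : List (List String)) (v : List String) :
    v ∈ (g.foldl
      (fun (st : PySem.Set (String × String × String × List String) × PySem.Set (List String)) e =>
        let seenKeys := PySem.Set.add st.1
          (PySem.List.pyGetD e 0 "", PySem.List.pyGetD e 1 "", PySem.List.pyGetD e 2 "",
           PySem.List.slice e (some 3) (some (-1)))
        if seenKeys.contains
             (PySem.List.pyGetD e 2 "", PySem.List.pyGetD e 1 "", PySem.List.pyGetD e 0 "",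
              PySem.List.slice e (some 3) (some (-1)))
        then (seenKeys, PySem.Set.add st.2 e)
        else (seenKeys, st.2))
      ([], [])).2 ↔ pvRem g v := by
  have main : ∀ (l : List (List String))
      (K : PySem.Set (String × String × String × List String))
      (R : PySem.Set (List String)),
      v ∈ (l.foldl
        (fun (st : PySem.Set (String × String × String × List String) × PySem.Set (List String)) e =>
          let seenKeys := PySem.Set.add st.1
            (PySem.List.pyGetD e 0 "", PySem.List.pyGetD e 1 "", PySem.List.pyGetD e 2 "",
             PySem.List.slice e (some 3) (some (-1)))
          if seenKeys.contains
               (PySem.List.pyGetD e 2 "", PySem.List.pyGetD e 1 "", PySem.List.pyGetD e 0 "",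
                PySem.List.slice e (some 3) (some (-1)))
          then (seenKeys, PySem.Set.add st.2 e)
          else (seenKeys, st.2))
        (K, R)).2 ↔ (v ∈ R ∨ pvRemK K l v) := by
    intro l
    induction l with
    | nil => intro K R; simp [pvRemK]
    | cons e t ih =>
      intro K R
      rw [List.foldl_cons]
      show v ∈ (t.foldl _
          (if (PySem.Set.add K (pvKey e)).contains (pvRKey e)
           then (PySem.Set.add K (pvKey e), PySem.Set.add R e)
           else (PySem.Set.add K (pvKey e), R))).2 ↔ _
      by_cases hm : pvRKey e ∈ PySem.Set.add K (pvKey e)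
      · have hc : (PySem.Set.add K (pvKey e)).contains (pvRKey e) = true :=
          (PySem.Set.contains_iff _ _).mpr hm
        rw [if_pos hc, ih]
        simp only [PySem.Set.mem_add] at hm
        simp only [pvRemK, PySem.Set.mem_add]
        tauto
      · rw [if_neg (by simpa using hm), ih]
        simp only [PySem.Set.mem_add] at hm
        simp only [pvRemK, PySem.Set.mem_add]
        tauto
  rw [main g [] [], pv_bridge]
  simp

theorem pv_loop2 (rem : PySem.Set (List String)) (l : List (List String))
    (res : List (List String)) (emitted : PySem.Set (List String)) :
    (l.foldl
      (fun (st : List (List String) × PySem.Set (List String)) e =>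
        if !(st.2.contains e) then
          ((if !(rem.contains e) then st.1 ++ [e] else st.1), PySem.Set.add st.2 e)
        else st)
      (res, emitted)).1
    = res ++ (pvDW emitted l).filter (fun e => !(rem.contains e)) := by
  induction l generalizing res emitted with
  | nil => simp [pvDW]
  | cons e t ih =>
    rw [List.foldl_cons]
    show (t.foldl _
        (if !(emitted.contains e) then
          ((if !(rem.contains e) then res ++ [e] else res), PySem.Set.add emitted e)
         else (res, emitted))).1 = _
    by_cases hm : e ∈ emitted
    · rw [if_neg (by simpa using hm), ih]
      simp [pvDW, hm]
    · rw [if_pos (by simpa using hm), ih]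
      by_cases hr : e ∈ rem <;>
        simp [pvDW, hm, hr, List.filter_cons, List.append_assoc]

theorem pv_update_eq_dw (l : List (List String)) (s : PySem.Set (List String)) :
    PySem.Set.update s l = s ++ pvDW s l := by
  induction l generalizing s with
  | nil => simp [PySem.Set.update, pvDW]
  | cons e t ih =>
    by_cases hm : e ∈ s
    · have hadd : PySem.Set.add s e = s := PySem.Set.add_of_mem hm
      rw [PySem.Set.update_cons, hadd, ih]
      simp [pvDW, hm]
    · have hadd : PySem.Set.add s e = s ++ [e] := PySem.Set.add_of_not_mem hm
      rw [PySem.Set.update_cons, ih, hadd]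
      simp [pvDW, hm, List.append_assoc]

theorem pv_ofList_eq_dw (g : List (List String)) :
    PySem.Set.ofList g = pvDW [] g := by
  rw [← PySem.Set.update_nil_left, pv_update_eq_dw]
  simp

-- ===== VERDICT (by name: the statement is the Claim_ definition above) =====
theorem refineasp_spec : Claim_equal_refineasp := by
  intro g _ _
  unfold Spec_refineasp
  simp only [refineasp, refineasp_alt]
  rw [pv_sameA_eq_goA, pv_loop2]
  rw [← pv_ofList_eq_dw]
  show (PySem.Set.ofList g).filter
      (fun x => !((PySem.Set.ofList (pvGoA g)).contains x)) = _
  rw [List.nil_append]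
  apply List.filter_congr
  intro x hx
  have h1 := pv_mem_scan g x
  have h2 := pv_mem_goA g x
  congr 1
  rw [Bool.eq_iff_iff, PySem.Set.contains_iff, PySem.Set.contains_iff,
    PySem.Set.mem_ofList]
  exact h2.trans h1.symm
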